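-- pv_equiv track=rewrite | github.com/GullyBurns/skillful-alhazen | local_skills/scientific-literature/scientific_literature.py | map_publication_type
-- ===== SOURCE A (Python) =====
-- def map_publication_type(pub_types: list) -> tuple:
--     """Map EPMC publication types to TypeDB entity types."""
--     pub_types_lower = [t.lower() for t in pub_types]
--
--     if "patent" in pub_types_lower:
--         return None, None
--     elif "clinical trial" in pub_types_lower:
--         return "scilit-paper", "ClinicalTrial"
--     elif any(t in pub_types_lower for t in [
--         "review", "systematic review", "systematic-review", "meta-analysis", "review-article",
--     ]):
--         return "scilit-review", "ScientificReviewArticle"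
--     elif "preprint" in pub_types_lower:
--         return "scilit-preprint", "ScientificPrimaryResearchPreprint"
--     elif any(t in pub_types_lower for t in ["journal article", "research-article"]):
--         return "scilit-paper", "ScientificPrimaryResearchArticle"
--     elif any(t in pub_types_lower for t in ["case-report", "case reports"]):
--         return "scilit-paper", "ClinicalCaseReport"
--     elif "practice guideline" in pub_types_lower:
--         return "scilit-paper", "ClinicalGuidelines"
--     elif any(t in pub_types_lower for t in ["letter", "comment", "editorial"]):
--         return "scilit-paper", "ScientificComment"
--     elif any(t in pub_types_lower for t in [
--         "published erratum", "correction", "retraction of publication",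
--     ]):
--         return "scilit-paper", "ScientificErrata"
--     else:
--         return None, None
-- ===== SOURCE B (Python) =====
-- # Priority-scoring rewrite: each known type string has a numeric priority; one pass
-- # over the input keeps the minimum priority seen, which indexes the result table.
-- _PRIORITY = {
--     "patent": 0,
--     "clinical trial": 1,
--     "review": 2, "systematic review": 2, "systematic-review": 2,
--     "meta-analysis": 2, "review-article": 2,
--     "preprint": 3,
--     "journal article": 4, "research-article": 4,
--     "case-report": 5, "case reports": 5,
--     "practice guideline": 6,
--     "letter": 7, "comment": 7, "editorial": 7,
--     "published erratum": 8, "correction": 8, "retraction of publication": 8,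
-- }
--
-- _RESULTS = [
--     (None, None),
--     ("scilit-paper", "ClinicalTrial"),
--     ("scilit-review", "ScientificReviewArticle"),
--     ("scilit-preprint", "ScientificPrimaryResearchPreprint"),
--     ("scilit-paper", "ScientificPrimaryResearchArticle"),
--     ("scilit-paper", "ClinicalCaseReport"),
--     ("scilit-paper", "ClinicalGuidelines"),
--     ("scilit-paper", "ScientificComment"),
--     ("scilit-paper", "ScientificErrata"),
-- ]
--
--
-- def map_publication_type(pub_types: list) -> tuple:
--     """Map EPMC publication types to TypeDB entity types."""
--     best = None
--     for t in pub_types: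
--         p = _PRIORITY.get(t.lower())
--         if p is not None and (best is None or p < best):
--             best = p
--     if best is None:
--         return None, None
--     return _RESULTS[best]
-- ===== Notes on version B (the rewrite author's own statement) =====
-- stated objective: faster
-- what changed: Replaced the nine-branch if/elif cascade of membership scans by a priority-scoring pass: a dict maps each known type string to a numeric priority, one loop over the input keeps the minimum priority seen, and that minimum indexes a result table.
import Mathlib
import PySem

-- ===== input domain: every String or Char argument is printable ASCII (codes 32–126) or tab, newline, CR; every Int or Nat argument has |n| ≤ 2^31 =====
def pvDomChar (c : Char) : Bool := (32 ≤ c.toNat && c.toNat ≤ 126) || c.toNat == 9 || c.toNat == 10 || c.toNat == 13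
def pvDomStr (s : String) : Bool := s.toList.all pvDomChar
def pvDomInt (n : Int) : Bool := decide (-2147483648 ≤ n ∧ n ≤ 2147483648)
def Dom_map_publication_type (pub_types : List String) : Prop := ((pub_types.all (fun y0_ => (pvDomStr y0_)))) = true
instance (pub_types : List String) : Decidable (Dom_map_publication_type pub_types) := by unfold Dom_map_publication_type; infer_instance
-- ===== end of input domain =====

-- B replaces the if/elif branch cascade by a priority score: every known type string
-- carries a numeric priority, one pass keeps the minimum priority seen, and that
-- minimum indexes a result table (objective: a genuinely different, single-pass algorithm).

-- ===== PORT A =====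
def map_publication_type (pub_types : List String) : Option String × Option String :=
  let pub_types_lower := pub_types.map (fun t => PySem.Str.lower t)
  if pub_types_lower.contains "patent" then (none, none)
  else if pub_types_lower.contains "clinical trial" then (some "scilit-paper", some "ClinicalTrial")
  else if (["review", "systematic review", "systematic-review", "meta-analysis",
            "review-article"] : List String).any (fun t => pub_types_lower.contains t) then
    (some "scilit-review", some "ScientificReviewArticle")
  else if pub_types_lower.contains "preprint" then (some "scilit-preprint", some "ScientificPrimaryResearchPreprint")
  else if (["journal article", "research-article"] : List String).any (fun t => pub_types_lower.contains t) then
    (some "scilit-paper", some "ScientificPrimaryResearchArticle")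
  else if (["case-report", "case reports"] : List String).any (fun t => pub_types_lower.contains t) then
    (some "scilit-paper", some "ClinicalCaseReport")
  else if pub_types_lower.contains "practice guideline" then (some "scilit-paper", some "ClinicalGuidelines")
  else if (["letter", "comment", "editorial"] : List String).any (fun t => pub_types_lower.contains t) then
    (some "scilit-paper", some "ScientificComment")
  else if (["published erratum", "correction", "retraction of publication"] : List String).any
            (fun t => pub_types_lower.contains t) then
    (some "scilit-paper", some "ScientificErrata")
  else (none, none)

-- ===== PORT B =====
-- Source B's _PRIORITY dict
def pvPrioDict : PySem.Dict String Nat := PySem.Dict.mk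
  [("patent", 0), ("clinical trial", 1),
   ("review", 2), ("systematic review", 2), ("systematic-review", 2),
   ("meta-analysis", 2), ("review-article", 2),
   ("preprint", 3),
   ("journal article", 4), ("research-article", 4),
   ("case-report", 5), ("case reports", 5),
   ("practice guideline", 6),
   ("letter", 7), ("comment", 7), ("editorial", 7),
   ("published erratum", 8), ("correction", 8), ("retraction of publication", 8)]

-- _PRIORITY.get(t)
def pvPrio (t : String) : Option Nat := pvPrioDict.get? t

-- Source B's _RESULTS table
def pvResults : List (Option String × Option String) :=
  [ (none, none),
    (some "scilit-paper", some "ClinicalTrial"),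
    (some "scilit-review", some "ScientificReviewArticle"),
    (some "scilit-preprint", some "ScientificPrimaryResearchPreprint"),
    (some "scilit-paper", some "ScientificPrimaryResearchArticle"),
    (some "scilit-paper", some "ClinicalCaseReport"),
    (some "scilit-paper", some "ClinicalGuidelines"),
    (some "scilit-paper", some "ScientificComment"),
    (some "scilit-paper", some "ScientificErrata") ]

-- loop body: if p is not None and (best is None or p < best): best = p
def pvStep (best p : Option Nat) : Option Nat :=
  match p with
  | none => best
  | some pv =>
    match best with
    | none => some pv
    | some bv => if pv < bv then some pv else best

def map_publication_type_alt (pub_types : List String) : Option String × Option String :=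
  let best := pub_types.foldl (fun b t => pvStep b (pvPrio (PySem.Str.lower t))) none
  match best with
  | none => (none, none)
  | some i => pvResults.getD i (none, none)

-- ===== PRECONDITION & SPEC =====
def Spec_map_publication_type (pub_types : List String) (out : Option String × Option String) : Prop := out = map_publication_type_alt pub_types
instance (pub_types : List String) (out : Option String × Option String) : Decidable (Spec_map_publication_type pub_types out) := by unfold Spec_map_publication_type; infer_instance

-- ===== CLAIM (what is proved, stated in full; the proofs are below) =====
def Claim_equal_map_publication_type : Prop := ∀ (pub_types : List String), Dom_map_publication_type pub_types → Spec_map_publication_type pub_types (map_publication_type pub_types)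

-- ===== LEMMAS AND PROOFS =====

-- the minimum-tracking fold of B, over the already-lowered list
def pvFold (M : List String) (b : Option Nat) : Option Nat :=
  M.foldl (fun b t => pvStep b (pvPrio t)) b

theorem pvStep_eq_none_iff (b p : Option Nat) : pvStep b p = none ↔ b = none ∧ p = none := by
  cases b <;> cases p <;> simp [pvStep] <;> split <;> simp

theorem pvStep_some_orig (b p : Option Nat) (i : Nat) (h : pvStep b p = some i) :
    b = some i ∨ p = some i := by
  rcases b with _ | bv <;> rcases p with _ | pv <;> simp only [pvStep] at h
  · exact absurd h (by simp)
  · exact Or.inr h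
  · exact Or.inl h
  · split at h
    · exact Or.inr h
    · exact Or.inl h

theorem pvStep_left_le (b p : Option Nat) (j : Nat) (h : b = some j) :
    ∃ m, pvStep b p = some m ∧ m ≤ j := by
  subst h
  rcases p with _ | pv
  · exact ⟨j, rfl, le_rfl⟩
  · by_cases hpj : pv < j
    · exact ⟨pv, by simp [pvStep, hpj], by omega⟩
    · exact ⟨j, by simp [pvStep, hpj], le_rfl⟩

theorem pvStep_right_le (b p : Option Nat) (j : Nat) (h : p = some j) :
    ∃ m, pvStep b p = some m ∧ m ≤ j := by
  subst h
  rcases b with _ | bv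
  · exact ⟨j, rfl, le_rfl⟩
  · by_cases hjb : j < bv
    · exact ⟨j, by simp [pvStep, hjb], le_rfl⟩
    · exact ⟨bv, by simp [pvStep, hjb], by omega⟩

theorem pvFold_none_iff (M : List String) (b : Option Nat) :
    pvFold M b = none ↔ b = none ∧ ∀ t ∈ M, pvPrio t = none := by
  induction M generalizing b with
  | nil => simp [pvFold]
  | cons t M ih =>
    have : pvFold (t :: M) b = pvFold M (pvStep b (pvPrio t)) := rfl
    rw [this, ih, pvStep_eq_none_iff]
    constructor
    · rintro ⟨⟨hb, hp⟩, hM⟩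
      exact ⟨hb, by intro u hu; rcases List.mem_cons.mp hu with rfl | hu; exact hp; exact hM u hu⟩
    · rintro ⟨hb, hM⟩
      exact ⟨⟨hb, hM t (List.mem_cons_self)⟩, fun u hu => hM u (List.mem_cons_of_mem _ hu)⟩

theorem pvFold_min (M : List String) : ∀ (b : Option Nat) (i : Nat), pvFold M b = some i →
    (b = some i ∨ ∃ t ∈ M, pvPrio t = some i) ∧
    (∀ j, b = some j → i ≤ j) ∧
    (∀ t ∈ M, ∀ j, pvPrio t = some j → i ≤ j) := by
  induction M with
  | nil =>
    intro b i h
    refine ⟨Or.inl h, fun j hj => ?_, by simp⟩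
    have : some i = some j := h ▸ hj
    exact le_of_eq (Option.some.inj this)
  | cons t M ih =>
    intro b i h
    have h' : pvFold M (pvStep b (pvPrio t)) = some i := h
    obtain ⟨ho, hb', hM⟩ := ih _ _ h'
    refine ⟨?_, ?_, ?_⟩
    · rcases ho with ho | ⟨u, hu, hpu⟩
      · rcases pvStep_some_orig _ _ _ ho with hb | hp
        · exact Or.inl hb
        · exact Or.inr ⟨t, List.mem_cons_self, hp⟩
      · exact Or.inr ⟨u, List.mem_cons_of_mem _ hu, hpu⟩
    · intro j hbj
      obtain ⟨m, hm, hmj⟩ := pvStep_left_le b (pvPrio t) j hbj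
      exact le_trans (hb' m hm) hmj
    · intro u hu j hpj
      rcases List.mem_cons.mp hu with rfl | hu
      · obtain ⟨m, hm, hmj⟩ := pvStep_right_le b (pvPrio u) j hpj
        exact le_trans (hb' m hm) hmj
      · exact hM u hu j hpj

theorem pvPrio_le8 (t : String) (j : Nat) (h : pvPrio t = some j) : j ≤ 8 := by
  unfold pvPrio pvPrioDict at h
  simp only [PySem.Dict.get?, List.find?_cons, List.find?_nil] at h
  repeat' split at h
  all_goals simp only [Option.map_some, Option.map_none, Option.some.injEq, reduceCtorEq] at h
  all_goals omega

theorem pvPrio_inv0 (t : String) (h : pvPrio t = some 0) : t = "patent" := by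
  unfold pvPrio pvPrioDict at h
  simp only [PySem.Dict.get?, List.find?_cons, List.find?_nil] at h
  repeat' split at h
  all_goals simp_all

theorem pvPrio_inv1 (t : String) (h : pvPrio t = some 1) : t = "clinical trial" := by
  unfold pvPrio pvPrioDict at h
  simp only [PySem.Dict.get?, List.find?_cons, List.find?_nil] at h
  repeat' split at h
  all_goals simp_all

theorem pvPrio_inv2 (t : String) (h : pvPrio t = some 2) : t = "review" ∨ t = "systematic review" ∨ t = "systematic-review" ∨ t = "meta-analysis" ∨ t = "review-article" := by
  unfold pvPrio pvPrioDict at h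
  simp only [PySem.Dict.get?, List.find?_cons, List.find?_nil] at h
  repeat' split at h
  all_goals simp_all

theorem pvPrio_inv3 (t : String) (h : pvPrio t = some 3) : t = "preprint" := by
  unfold pvPrio pvPrioDict at h
  simp only [PySem.Dict.get?, List.find?_cons, List.find?_nil] at h
  repeat' split at h
  all_goals simp_all

theorem pvPrio_inv4 (t : String) (h : pvPrio t = some 4) : t = "journal article" ∨ t = "research-article" := by
  unfold pvPrio pvPrioDict at h
  simp only [PySem.Dict.get?, List.find?_cons, List.find?_nil] at h
  repeat' split at h
  all_goals simp_all

theorem pvPrio_inv5 (t : String) (h : pvPrio t = some 5) : t = "case-report" ∨ t = "case reports" := by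
  unfold pvPrio pvPrioDict at h
  simp only [PySem.Dict.get?, List.find?_cons, List.find?_nil] at h
  repeat' split at h
  all_goals simp_all

theorem pvPrio_inv6 (t : String) (h : pvPrio t = some 6) : t = "practice guideline" := by
  unfold pvPrio pvPrioDict at h
  simp only [PySem.Dict.get?, List.find?_cons, List.find?_nil] at h
  repeat' split at h
  all_goals simp_all

theorem pvPrio_inv7 (t : String) (h : pvPrio t = some 7) : t = "letter" ∨ t = "comment" ∨ t = "editorial" := by
  unfold pvPrio pvPrioDict at h
  simp only [PySem.Dict.get?, List.find?_cons, List.find?_nil] at h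
  repeat' split at h
  all_goals simp_all

theorem pvPrio_inv8 (t : String) (h : pvPrio t = some 8) : t = "published erratum" ∨ t = "correction" ∨ t = "retraction of publication" := by
  unfold pvPrio pvPrioDict at h
  simp only [PySem.Dict.get?, List.find?_cons, List.find?_nil] at h
  repeat' split at h
  all_goals simp_all

-- ===== VERDICT (by name: the statement is the Claim_ definition above) =====

theorem map_publication_type_spec : Claim_equal_map_publication_type := by
  intro pub_types _
  unfold Spec_map_publication_type map_publication_type map_publication_type_alt
  have hfold : pub_types.foldl (fun b t => pvStep b (pvPrio (PySem.Str.lower t))) none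
      = pvFold (pub_types.map (fun t => PySem.Str.lower t)) none := by
    simp [pvFold, List.foldl_map]
  rw [hfold]
  rcases h : pvFold (pub_types.map (fun t => PySem.Str.lower t)) none with _ | i
  · -- no known type occurs: both sides give (none, none)
    have hall := (pvFold_none_iff _ _).mp h |>.2
    have hc : ∀ (k : String), pvPrio k ≠ none →
        ¬ ∃ a, a ∈ pub_types ∧ PySem.Str.lower a = k := by
      rintro k hk ⟨a, ha, rfl⟩
      exact hk (hall _ (List.mem_map_of_mem ha))
    simp [hc "patent" (by decide), hc "clinical trial" (by decide), hc "review" (by decide), hc "systematic review" (by decide), hc "systematic-review" (by decide), hc "meta-analysis" (by decide), hc "review-article" (by decide), hc "preprint" (by decide), hc "journal article" (by decide), hc "research-article" (by decide), hc "case-report" (by decide), hc "case reports" (by decide), hc "practice guideline" (by decide), hc "letter" (by decide), hc "comment" (by decide), hc "editorial" (by decide), hc "published erratum" (by decide), hc "correction" (by decide), hc "retraction of publication" (by decide)]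
  · -- minimum priority i was seen
    obtain ⟨ho, _, hmin⟩ := pvFold_min _ none i h
    have hhit : ∃ t ∈ pub_types.map (fun t => PySem.Str.lower t), pvPrio t = some i := by
      rcases ho with ho | ho
      · exact absurd ho (by simp)
      · exact ho
    obtain ⟨t, htM, hpt⟩ := hhit
    have hi8 : i ≤ 8 := pvPrio_le8 t i hpt
    have hf : ∀ (k : String) (j : Nat), pvPrio k = some j → j < i →
        ¬ ∃ a, a ∈ pub_types ∧ PySem.Str.lower a = k := by
      rintro k j hk hj ⟨a, ha, rfl⟩
      exact absurd (hmin _ (List.mem_map_of_mem ha) j hk) (by omega)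
    have hmem : ∃ a, a ∈ pub_types ∧ PySem.Str.lower a = t := List.mem_map.mp htM
    interval_cases i
    · -- minimum priority 0
      rcases pvPrio_inv0 t hpt with rfl <;>
        simp [hmem, pvResults]
    · -- minimum priority 1
      rcases pvPrio_inv1 t hpt with rfl <;>
        simp [hf "patent" 0 (by decide) (by omega), hmem, pvResults]
    · -- minimum priority 2
      rcases pvPrio_inv2 t hpt with rfl | rfl | rfl | rfl | rfl <;>
        simp [hf "patent" 0 (by decide) (by omega), hf "clinical trial" 1 (by decide) (by omega), hmem, pvResults]
    · -- minimum priority 3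
      rcases pvPrio_inv3 t hpt with rfl <;>
        simp [hf "patent" 0 (by decide) (by omega), hf "clinical trial" 1 (by decide) (by omega), hf "review" 2 (by decide) (by omega), hf "systematic review" 2 (by decide) (by omega), hf "systematic-review" 2 (by decide) (by omega), hf "meta-analysis" 2 (by decide) (by omega), hf "review-article" 2 (by decide) (by omega), hmem, pvResults]
    · -- minimum priority 4
      rcases pvPrio_inv4 t hpt with rfl | rfl <;>
        simp [hf "patent" 0 (by decide) (by omega), hf "clinical trial" 1 (by decide) (by omega), hf "review" 2 (by decide) (by omega), hf "systematic review" 2 (by decide) (by omega), hf "systematic-review" 2 (by decide) (by omega), hf "meta-analysis" 2 (by decide) (by omega), hf "review-article" 2 (by decide) (by omega), hf "preprint" 3 (by decide) (by omega), hmem, pvResults]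
    · -- minimum priority 5
      rcases pvPrio_inv5 t hpt with rfl | rfl <;>
        simp [hf "patent" 0 (by decide) (by omega), hf "clinical trial" 1 (by decide) (by omega), hf "review" 2 (by decide) (by omega), hf "systematic review" 2 (by decide) (by omega), hf "systematic-review" 2 (by decide) (by omega), hf "meta-analysis" 2 (by decide) (by omega), hf "review-article" 2 (by decide) (by omega), hf "preprint" 3 (by decide) (by omega), hf "journal article" 4 (by decide) (by omega), hf "research-article" 4 (by decide) (by omega), hmem, pvResults]
    · -- minimum priority 6
      rcases pvPrio_inv6 t hpt with rfl <;>
        simp [hf "patent" 0 (by decide) (by omega), hf "clinical trial" 1 (by decide) (by omega), hf "review" 2 (by decide) (by omega), hf "systematic review" 2 (by decide) (by omega), hf "systematic-review" 2 (by decide) (by omega), hf "meta-analysis" 2 (by decide) (by omega), hf "review-article" 2 (by decide) (by omega), hf "preprint" 3 (by decide) (by omega), hf "journal article" 4 (by decide) (by omega), hf "research-article" 4 (by decide) (by omega), hf "case-report" 5 (by decide) (by omega), hf "case reports" 5 (by decide) (by omega), hmem, pvResults]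
    · -- minimum priority 7
      rcases pvPrio_inv7 t hpt with rfl | rfl | rfl <;>
        simp [hf "patent" 0 (by decide) (by omega), hf "clinical trial" 1 (by decide) (by omega), hf "review" 2 (by decide) (by omega), hf "systematic review" 2 (by decide) (by omega), hf "systematic-review" 2 (by decide) (by omega), hf "meta-analysis" 2 (by decide) (by omega), hf "review-article" 2 (by decide) (by omega), hf "preprint" 3 (by decide) (by omega), hf "journal article" 4 (by decide) (by omega), hf "research-article" 4 (by decide) (by omega), hf "case-report" 5 (by decide) (by omega), hf "case reports" 5 (by decide) (by omega), hf "practice guideline" 6 (by decide) (by omega), hmem, pvResults]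
    · -- minimum priority 8
      rcases pvPrio_inv8 t hpt with rfl | rfl | rfl <;>
        simp [hf "patent" 0 (by decide) (by omega), hf "clinical trial" 1 (by decide) (by omega), hf "review" 2 (by decide) (by omega), hf "systematic review" 2 (by decide) (by omega), hf "systematic-review" 2 (by decide) (by omega), hf "meta-analysis" 2 (by decide) (by omega), hf "review-article" 2 (by decide) (by omega), hf "preprint" 3 (by decide) (by omega), hf "journal article" 4 (by decide) (by omega), hf "research-article" 4 (by decide) (by omega), hf "case-report" 5 (by decide) (by omega), hf "case reports" 5 (by decide) (by omega), hf "practice guideline" 6 (by decide) (by omega), hf "letter" 7 (by decide) (by omega), hf "comment" 7 (by decide) (by omega), hf "editorial" 7 (by decide) (by omega), hmem, pvResults]
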